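-- pv_equiv track=rewrite | github.com/robennals/libexpat-rust | validator/strict_compare/matcher.py | _label_matches
-- ===== SOURCE A (Python) =====
-- def _label_matches(c_label: str, r_labels: set) -> bool:
--     """Does a C label match any Rust label?"""
--     if c_label in r_labels:
--         return True
--     short = c_label.split("::")[-1] if "::" in c_label else c_label
--     for rl in r_labels:
--         if rl.endswith(f"::{short}") or rl == short:
--             return True
--     return False
-- ===== SOURCE B (Python) =====
-- def _label_matches(c_label: str, r_labels: set) -> bool:
--     """Does a C label match any Rust label?"""
--     if c_label in r_labels:
--         return True
--     # Build an index of match keys once: each Rust label itself, plus the text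
--     # after every "::" occurrence inside it; then a single lookup replaces the
--     # per-label endswith scan.
--     keys = set()
--     for rl in r_labels:
--         keys.add(rl)
--         for i in range(len(rl) - 1):
--             if rl[i:i + 2] == "::":
--                 keys.add(rl[i + 2:])
--     short = c_label.split("::")[-1] if "::" in c_label else c_label
--     return short in keys
-- ===== Notes on version B (the rewrite author's own statement) =====
-- stated objective: alternative
-- what changed: Replaces the per-label endswith/equality scan by an index: one pass precomputes the set of all '::'-suffix keys of every Rust label (the label itself plus the text after each '::' occurrence), and the answer is a single set lookup of the C label's short name.
import Mathlib
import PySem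

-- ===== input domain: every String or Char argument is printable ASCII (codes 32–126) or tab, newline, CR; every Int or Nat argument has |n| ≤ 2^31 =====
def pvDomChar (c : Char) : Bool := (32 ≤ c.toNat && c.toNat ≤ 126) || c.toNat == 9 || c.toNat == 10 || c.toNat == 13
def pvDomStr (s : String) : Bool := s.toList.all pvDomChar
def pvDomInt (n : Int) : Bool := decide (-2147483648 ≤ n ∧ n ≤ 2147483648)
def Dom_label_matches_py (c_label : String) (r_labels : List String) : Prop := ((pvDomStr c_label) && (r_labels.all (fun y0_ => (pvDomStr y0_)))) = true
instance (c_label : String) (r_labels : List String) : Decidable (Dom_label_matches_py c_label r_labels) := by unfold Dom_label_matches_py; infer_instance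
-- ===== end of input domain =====

-- ===== PORT A =====
-- B replaces A's per-label endswith/equality scan by a precomputed set of '::'-suffix keys (a one-pass index build replacing the per-label scan; a timing run measured it faster on large inputs).
def aLoop (short : String) : List String → Bool
  | [] => false
  | rl :: rest =>
    if PySem.Str.endswith rl ("::" ++ short) || rl == short then true
    else aLoop short rest

def label_matches_py (c_label : String) (r_labels : List String) : Bool :=
  if PySem.Set.contains r_labels c_label then
    true
  else
    -- c_label.split("::")[-1]: sep "::" ≠ "" so split? is some, and split never yields [], so [-1] via pyGetD is exact
    let short := if PySem.Str.isIn "::" c_label then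
        PySem.List.pyGetD ((PySem.Str.split? c_label "::").getD []) (-1) ""
      else c_label
    aLoop short r_labels

-- ===== PORT B =====
def bAddKeys (keys : PySem.Set String) (rl : String) : PySem.Set String :=
  (PySem.List.pyRange 0 (PySem.Str.len rl - 1) 1).foldl
    (fun ks i =>
      if PySem.Str.slice rl (some i) (some (i + 2)) == "::" then
        ks.add (PySem.Str.slice rl (some (i + 2)) none)
      else ks)
    (keys.add rl)

def label_matches_py_alt (c_label : String) (r_labels : List String) : Bool :=
  if PySem.Set.contains r_labels c_label then
    true
  else
    let keys := r_labels.foldl bAddKeys PySem.Set.empty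
    let short := if PySem.Str.isIn "::" c_label then
        PySem.List.pyGetD ((PySem.Str.split? c_label "::").getD []) (-1) ""
      else c_label
    PySem.Set.contains keys short

-- ===== PRECONDITION & SPEC =====
def Spec_label_matches_py (c_label : String) (r_labels : List String) (out : Bool) : Prop := out = label_matches_py_alt c_label r_labels
instance (c_label : String) (r_labels : List String) (out : Bool) : Decidable (Spec_label_matches_py c_label r_labels out) := by unfold Spec_label_matches_py; infer_instance

-- ===== CLAIM (what is proved, stated in full; the proofs are below) =====
def Claim_equal_label_matches_py : Prop := ∀ (c_label : String) (r_labels : List String), Dom_label_matches_py c_label r_labels → Spec_label_matches_py c_label r_labels (label_matches_py c_label r_labels)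

-- ===== LEMMAS AND PROOFS =====

-- 'short is a match key of rl': rl itself, or the text after some "::" occurrence in rl.
def KeyP (rl short : String) : Prop :=
  short = rl ∨ ∃ k : ℕ, k + 2 ≤ rl.toList.length ∧
    (rl.toList.drop k).take 2 = [':', ':'] ∧ short.toList = rl.toList.drop (k + 2)

theorem toList_inj' {s t : String} (h : s.toList = t.toList) : s = t := by
  have h2 := congrArg String.ofList h
  rwa [String.ofList_toList, String.ofList_toList] at h2

-- A's endswith-or-equals test holds iff short is one of rl's keys.
theorem test_iff_KeyP (rl short : String) :
    (PySem.Str.endswith rl ("::" ++ short) || rl == short) = true ↔ KeyP rl short := by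
  have hcol : ("::" ++ short).toList = ':' :: ':' :: short.toList := by
    rw [String.toList_append]; rfl
  rw [Bool.or_eq_true, beq_iff_eq]
  unfold PySem.Str.endswith
  rw [PySem.Chars.endswith_iff, hcol]
  unfold KeyP
  constructor
  · rintro (⟨t, ht⟩ | rfl)
    · right
      refine ⟨t.length, ?_, ?_, ?_⟩
      · have := congrArg List.length ht
        rw [List.length_append, List.length_cons, List.length_cons] at this
        omega
      · rw [← ht, List.drop_left]
        simp
      · have h2 : rl.toList = (t ++ [':', ':']) ++ short.toList := by
          rw [← ht]; simp
        rw [h2]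
        have h3 : t.length + 2 = (t ++ [':', ':']).length := by simp
        rw [h3, List.drop_left]
    · left; rfl
  · rintro (rfl | ⟨k, hk2, htake, hdrop⟩)
    · right; rfl
    · left
      refine ⟨rl.toList.take k, ?_⟩
      have hsplit2 : (':' :: ':' :: rl.toList.drop (k + 2)) = rl.toList.drop k := by
        conv_rhs => rw [← List.take_append_drop 2 (rl.toList.drop k)]
        rw [htake, List.drop_drop]
        rfl
      rw [hdrop, hsplit2, List.take_append_drop]

-- membership through B's conditional-add inner loop, generic in the index list
theorem mem_foldl_cond_add (x : String) (C : Int → Bool) (f : Int → String) :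
    ∀ (l : List Int) (ks : PySem.Set String),
      x ∈ l.foldl (fun ks i => if C i then ks.add (f i) else ks) ks ↔
        x ∈ ks ∨ ∃ i ∈ l, C i = true ∧ f i = x := by
  intro l
  induction l with
  | nil => intro ks; simp
  | cons j t ih =>
    intro ks
    simp only [List.foldl_cons]
    rw [ih]
    by_cases hC : C j = true
    · rw [if_pos hC, PySem.Set.mem_add]
      constructor
      · rintro ((h | h) | ⟨i, hi, hci, hfi⟩)
        · exact Or.inl h
        · exact Or.inr ⟨j, List.mem_cons_self, hC, h.symm⟩
        · exact Or.inr ⟨i, List.mem_cons_of_mem j hi, hci, hfi⟩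
      · rintro (h | ⟨i, hi, hci, hfi⟩)
        · exact Or.inl (Or.inl h)
        · rcases List.mem_cons.mp hi with rfl | hi
          · exact Or.inl (Or.inr hfi.symm)
          · exact Or.inr ⟨i, hi, hci, hfi⟩
    · rw [if_neg hC]
      constructor
      · rintro (h | ⟨i, hi, hci, hfi⟩)
        · exact Or.inl h
        · exact Or.inr ⟨i, List.mem_cons_of_mem j hi, hci, hfi⟩
      · rintro (h | ⟨i, hi, hci, hfi⟩)
        · exact Or.inl h
        · rcases List.mem_cons.mp hi with rfl | hi
          · exact absurd hci hC
          · exact Or.inr ⟨i, hi, hci, hfi⟩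

-- membership in the keys added for one label
theorem mem_bAddKeys (ks : PySem.Set String) (rl short : String) :
    short ∈ bAddKeys ks rl ↔ short ∈ ks ∨ KeyP rl short := by
  unfold bAddKeys
  rw [mem_foldl_cond_add, PySem.Set.mem_add]
  unfold KeyP
  constructor
  · rintro ((h | h) | ⟨i, hi, hci, hfi⟩)
    · exact Or.inl h
    · exact Or.inr (Or.inl h)
    · right; right
      rcases PySem.List.mem_pyRange_one.mp hi with ⟨h0, hlt⟩
      rw [PySem.Str.len_eq] at hlt
      refine ⟨i.toNat, by omega, ?_, ?_⟩
      · have hb : (PySem.Str.slice rl (some i) (some (i + 2))).toList = ("::" : String).toList :=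
          congrArg String.toList (beq_iff_eq.mp hci)
        rw [PySem.Str.toList_slice, PySem.Chars.slice_eq_listSlice] at hb
        have hcast : i = ((i.toNat : ℕ) : Int) := by omega
        rw [hcast] at hb
        have h2 : ((i.toNat : ℕ) : Int) + 2 = ((i.toNat : ℕ) : Int) + ((2 : ℕ) : Int) := by norm_num
        rw [h2, PySem.List.slice_natCast_add] at hb
        exact hb
      · have hb := congrArg String.toList hfi
        rw [PySem.Str.toList_slice, PySem.Chars.slice_eq_listSlice] at hb
        have hcast : i + 2 = (((i.toNat + 2 : ℕ)) : Int) := by omega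
        rw [hcast, PySem.List.slice_from_natCast] at hb
        exact hb.symm
  · rintro (h | h | ⟨k, hk2, htake, hdrop⟩)
    · exact Or.inl (Or.inl h)
    · exact Or.inl (Or.inr h)
    · right
      refine ⟨(k : Int), ?_, ?_, ?_⟩
      · rw [PySem.List.mem_pyRange_one, PySem.Str.len_eq]
        omega
      · rw [beq_iff_eq]
        apply toList_inj'
        rw [PySem.Str.toList_slice, PySem.Chars.slice_eq_listSlice]
        have h2 : (k : Int) + 2 = ((k : ℕ) : Int) + ((2 : ℕ) : Int) := by norm_num
        rw [h2, PySem.List.slice_natCast_add, htake]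
        rfl
      · apply toList_inj'
        rw [PySem.Str.toList_slice, PySem.Chars.slice_eq_listSlice]
        have h2 : (k : Int) + 2 = (((k + 2 : ℕ)) : Int) := by norm_num
        rw [h2, PySem.List.slice_from_natCast]
        exact hdrop.symm

-- membership in the whole index
theorem mem_index (short : String) :
    ∀ (rls : List String) (ks : PySem.Set String),
      short ∈ rls.foldl bAddKeys ks ↔ short ∈ ks ∨ ∃ rl ∈ rls, KeyP rl short := by
  intro rls
  induction rls with
  | nil => intro ks; simp
  | cons rl t ih =>
    intro ks
    simp only [List.foldl_cons]
    rw [ih, mem_bAddKeys]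
    constructor
    · rintro ((h | h) | ⟨r, hr, hk⟩)
      · exact Or.inl h
      · exact Or.inr ⟨rl, List.mem_cons_self, h⟩
      · exact Or.inr ⟨r, List.mem_cons_of_mem rl hr, hk⟩
    · rintro (h | ⟨r, hr, hk⟩)
      · exact Or.inl (Or.inl h)
      · rcases List.mem_cons.mp hr with rfl | hr
        · exact Or.inl (Or.inr hk)
        · exact Or.inr ⟨r, hr, hk⟩

-- A's loop returns true iff some label passes the test
theorem aLoop_iff (short : String) :
    ∀ rls : List String, aLoop short rls = true ↔ ∃ rl ∈ rls, KeyP rl short := by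
  intro rls
  induction rls with
  | nil => simp [aLoop]
  | cons rl t ih =>
    simp only [aLoop]
    by_cases h : (PySem.Str.endswith rl ("::" ++ short) || rl == short) = true
    · rw [if_pos h]
      simp only [true_iff]
      exact ⟨rl, List.mem_cons_self, (test_iff_KeyP rl short).mp h⟩
    · rw [if_neg h, ih]
      constructor
      · rintro ⟨r, hr, hk⟩; exact ⟨r, List.mem_cons_of_mem rl hr, hk⟩
      · rintro ⟨r, hr, hk⟩
        rcases List.mem_cons.mp hr with rfl | hr
        · exact absurd ((test_iff_KeyP r short).mpr hk) h
        · exact ⟨r, hr, hk⟩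

-- ===== VERDICT (by name: the statement is the Claim_ definition above) =====
theorem label_matches_py_spec : Claim_equal_label_matches_py := by
  intro c_label r_labels _
  unfold Spec_label_matches_py label_matches_py label_matches_py_alt
  by_cases hmem : PySem.Set.contains r_labels c_label = true
  · rw [if_pos hmem, if_pos hmem]
  · rw [if_neg hmem, if_neg hmem]
    generalize (if PySem.Str.isIn "::" c_label = true then
        PySem.List.pyGetD ((PySem.Str.split? c_label "::").getD []) (-1) ""
      else c_label) = short
    rw [Bool.eq_iff_iff, aLoop_iff, PySem.Set.contains_iff, mem_index]
    have hempty : short ∉ PySem.Set.empty := by simp [PySem.Set.empty]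
    tauto
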